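/- GENERATED by tools/mkclosed.py from the statements of the base image (Base/Spec/Units/*.lean) — do not edit; re-run it when a statement changes.
   THE BOTTOM-UP COMPOSITION: every unit's contract with no hypothesis about a callee left, from the unit theorems, in a
   topological order of the hypotheses (42 units, 42 functions). -/
import ProgX.Base.Spec.Proved.abs
import ProgX.Base.Spec.Proved.arena_poison
import ProgX.Base.Spec.Proved.arena_unpoison
import ProgX.Base.Spec.Proved.asan_load1_noabort
import ProgX.Base.Spec.Proved.asan_load2_noabort
import ProgX.Base.Spec.Proved.asan_load4_noabort
import ProgX.Base.Spec.Proved.asan_load8_noabort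
import ProgX.Base.Spec.Proved.asan_store1_noabort
import ProgX.Base.Spec.Proved.asan_store2_noabort
import ProgX.Base.Spec.Proved.asan_store4_noabort
import ProgX.Base.Spec.Proved.asan_store8_noabort
import ProgX.Base.Spec.Proved.cos_poly
import ProgX.Base.Spec.Proved.floor
import ProgX.Base.Spec.Proved.heap_alloc
import ProgX.Base.Spec.Proved.heap_live_size
import ProgX.Base.Spec.Proved.heap_product_ok
import ProgX.Base.Spec.Proved.malloc
import ProgX.Base.Spec.Proved.memcmp
import ProgX.Base.Spec.Proved.memcpy
import ProgX.Base.Spec.Proved.memset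
import ProgX.Base.Spec.Proved.pow_int
import ProgX.Base.Spec.Proved.range_bad
import ProgX.Base.Spec.Proved.sin_poly
import ProgX.Base.Spec.Proved.sincos_quadrant
import ProgX.Base.Spec.Proved.swap_bytes
import ProgX.Base.Spec.Proved.two_to
import ProgX.Base.Spec.Proved.asan_load16_noabort
import ProgX.Base.Spec.Proved.asan_loadN_noabort
import ProgX.Base.Spec.Proved.asan_store16_noabort
import ProgX.Base.Spec.Proved.asan_storeN_noabort
import ProgX.Base.Spec.Proved.calloc
import ProgX.Base.Spec.Proved.cos
import ProgX.Base.Spec.Proved.free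
import ProgX.Base.Spec.Proved.ldexp
import ProgX.Base.Spec.Proved.log
import ProgX.Base.Spec.Proved.realloc
import ProgX.Base.Spec.Proved.reallocarray
import ProgX.Base.Spec.Proved.sift_down
import ProgX.Base.Spec.Proved.sin
import ProgX.Base.Spec.Proved.exp
import ProgX.Base.Spec.Proved.pow
import ProgX.Base.Spec.Proved.qsort
namespace ProgX.Base.Closed
open X86 X86.User Asan

/-- **The bytes of every function are in the reference state**: the `_hcode` hypothesis of its units. -/
structure AllCode (Lay : Layout) (u₀ : State) : Prop where
  /-- the bytes of `abs` -/
  abs : HasCodeNat Lay u₀ ProgX.Base.L.abs.entry ProgX.Base.Code.code_abs.nat ProgX.Base.L.abs.size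
  /-- the bytes of `arena_poison` -/
  arena_poison : HasCodeNat Lay u₀ ProgX.Base.L.arena_poison.entry ProgX.Base.Code.code_arena_poison.nat ProgX.Base.L.arena_poison.size
  /-- the bytes of `arena_unpoison` -/
  arena_unpoison : HasCodeNat Lay u₀ ProgX.Base.L.arena_unpoison.entry ProgX.Base.Code.code_arena_unpoison.nat ProgX.Base.L.arena_unpoison.size
  /-- the bytes of `__asan_load1_noabort` -/
  asan_load1_noabort : HasCodeNat Lay u₀ ProgX.Base.L.__asan_load1_noabort.entry ProgX.Base.Code.code___asan_load1_noabort.nat ProgX.Base.L.__asan_load1_noabort.size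
  /-- the bytes of `__asan_load2_noabort` -/
  asan_load2_noabort : HasCodeNat Lay u₀ ProgX.Base.L.__asan_load2_noabort.entry ProgX.Base.Code.code___asan_load2_noabort.nat ProgX.Base.L.__asan_load2_noabort.size
  /-- the bytes of `__asan_load4_noabort` -/
  asan_load4_noabort : HasCodeNat Lay u₀ ProgX.Base.L.__asan_load4_noabort.entry ProgX.Base.Code.code___asan_load4_noabort.nat ProgX.Base.L.__asan_load4_noabort.size
  /-- the bytes of `__asan_load8_noabort` -/
  asan_load8_noabort : HasCodeNat Lay u₀ ProgX.Base.L.__asan_load8_noabort.entry ProgX.Base.Code.code___asan_load8_noabort.nat ProgX.Base.L.__asan_load8_noabort.size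
  /-- the bytes of `__asan_store1_noabort` -/
  asan_store1_noabort : HasCodeNat Lay u₀ ProgX.Base.L.__asan_store1_noabort.entry ProgX.Base.Code.code___asan_store1_noabort.nat ProgX.Base.L.__asan_store1_noabort.size
  /-- the bytes of `__asan_store2_noabort` -/
  asan_store2_noabort : HasCodeNat Lay u₀ ProgX.Base.L.__asan_store2_noabort.entry ProgX.Base.Code.code___asan_store2_noabort.nat ProgX.Base.L.__asan_store2_noabort.size
  /-- the bytes of `__asan_store4_noabort` -/
  asan_store4_noabort : HasCodeNat Lay u₀ ProgX.Base.L.__asan_store4_noabort.entry ProgX.Base.Code.code___asan_store4_noabort.nat ProgX.Base.L.__asan_store4_noabort.size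
  /-- the bytes of `__asan_store8_noabort` -/
  asan_store8_noabort : HasCodeNat Lay u₀ ProgX.Base.L.__asan_store8_noabort.entry ProgX.Base.Code.code___asan_store8_noabort.nat ProgX.Base.L.__asan_store8_noabort.size
  /-- the bytes of `cos_poly` -/
  cos_poly : HasCodeNat Lay u₀ ProgX.Base.L.cos_poly.entry ProgX.Base.Code.code_cos_poly.nat ProgX.Base.L.cos_poly.size
  /-- the bytes of `floor` -/
  floor : HasCodeNat Lay u₀ ProgX.Base.L.floor.entry ProgX.Base.Code.code_floor.nat ProgX.Base.L.floor.size
  /-- the bytes of `heap_alloc` -/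
  heap_alloc : HasCodeNat Lay u₀ ProgX.Base.L.heap_alloc.entry ProgX.Base.Code.code_heap_alloc.nat ProgX.Base.L.heap_alloc.size
  /-- the bytes of `heap_live_size` -/
  heap_live_size : HasCodeNat Lay u₀ ProgX.Base.L.heap_live_size.entry ProgX.Base.Code.code_heap_live_size.nat ProgX.Base.L.heap_live_size.size
  /-- the bytes of `heap_product_ok` -/
  heap_product_ok : HasCodeNat Lay u₀ ProgX.Base.L.heap_product_ok.entry ProgX.Base.Code.code_heap_product_ok.nat ProgX.Base.L.heap_product_ok.size
  /-- the bytes of `malloc` -/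
  malloc : HasCodeNat Lay u₀ ProgX.Base.L.malloc.entry ProgX.Base.Code.code_malloc.nat ProgX.Base.L.malloc.size
  /-- the bytes of `memcmp` -/
  memcmp : HasCodeNat Lay u₀ ProgX.Base.L.memcmp.entry ProgX.Base.Code.code_memcmp.nat ProgX.Base.L.memcmp.size
  /-- the bytes of `memcpy` -/
  memcpy : HasCodeNat Lay u₀ ProgX.Base.L.memcpy.entry ProgX.Base.Code.code_memcpy.nat ProgX.Base.L.memcpy.size
  /-- the bytes of `memset` -/
  memset : HasCodeNat Lay u₀ ProgX.Base.L.memset.entry ProgX.Base.Code.code_memset.nat ProgX.Base.L.memset.size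
  /-- the bytes of `pow_int` -/
  pow_int : HasCodeNat Lay u₀ ProgX.Base.L.pow_int.entry ProgX.Base.Code.code_pow_int.nat ProgX.Base.L.pow_int.size
  /-- the bytes of `range_bad` -/
  range_bad : HasCodeNat Lay u₀ ProgX.Base.L.range_bad.entry ProgX.Base.Code.code_range_bad.nat ProgX.Base.L.range_bad.size
  /-- the bytes of `sin_poly` -/
  sin_poly : HasCodeNat Lay u₀ ProgX.Base.L.sin_poly.entry ProgX.Base.Code.code_sin_poly.nat ProgX.Base.L.sin_poly.size
  /-- the bytes of `sincos_quadrant` -/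
  sincos_quadrant : HasCodeNat Lay u₀ ProgX.Base.L.sincos_quadrant.entry ProgX.Base.Code.code_sincos_quadrant.nat ProgX.Base.L.sincos_quadrant.size
  /-- the bytes of `swap_bytes` -/
  swap_bytes : HasCodeNat Lay u₀ ProgX.Base.L.swap_bytes.entry ProgX.Base.Code.code_swap_bytes.nat ProgX.Base.L.swap_bytes.size
  /-- the bytes of `two_to` -/
  two_to : HasCodeNat Lay u₀ ProgX.Base.L.two_to.entry ProgX.Base.Code.code_two_to.nat ProgX.Base.L.two_to.size
  /-- the bytes of `__asan_load16_noabort` -/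
  asan_load16_noabort : HasCodeNat Lay u₀ ProgX.Base.L.__asan_load16_noabort.entry ProgX.Base.Code.code___asan_load16_noabort.nat ProgX.Base.L.__asan_load16_noabort.size
  /-- the bytes of `__asan_loadN_noabort` -/
  asan_loadN_noabort : HasCodeNat Lay u₀ ProgX.Base.L.__asan_loadN_noabort.entry ProgX.Base.Code.code___asan_loadN_noabort.nat ProgX.Base.L.__asan_loadN_noabort.size
  /-- the bytes of `__asan_store16_noabort` -/
  asan_store16_noabort : HasCodeNat Lay u₀ ProgX.Base.L.__asan_store16_noabort.entry ProgX.Base.Code.code___asan_store16_noabort.nat ProgX.Base.L.__asan_store16_noabort.size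
  /-- the bytes of `__asan_storeN_noabort` -/
  asan_storeN_noabort : HasCodeNat Lay u₀ ProgX.Base.L.__asan_storeN_noabort.entry ProgX.Base.Code.code___asan_storeN_noabort.nat ProgX.Base.L.__asan_storeN_noabort.size
  /-- the bytes of `calloc` -/
  calloc : HasCodeNat Lay u₀ ProgX.Base.L.calloc.entry ProgX.Base.Code.code_calloc.nat ProgX.Base.L.calloc.size
  /-- the bytes of `cos` -/
  cos : HasCodeNat Lay u₀ ProgX.Base.L.cos.entry ProgX.Base.Code.code_cos.nat ProgX.Base.L.cos.size
  /-- the bytes of `free` -/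
  free : HasCodeNat Lay u₀ ProgX.Base.L.free.entry ProgX.Base.Code.code_free.nat ProgX.Base.L.free.size
  /-- the bytes of `ldexp` -/
  ldexp : HasCodeNat Lay u₀ ProgX.Base.L.ldexp.entry ProgX.Base.Code.code_ldexp.nat ProgX.Base.L.ldexp.size
  /-- the bytes of `log` -/
  log : HasCodeNat Lay u₀ ProgX.Base.L.log.entry ProgX.Base.Code.code_log.nat ProgX.Base.L.log.size
  /-- the bytes of `realloc` -/
  realloc : HasCodeNat Lay u₀ ProgX.Base.L.realloc.entry ProgX.Base.Code.code_realloc.nat ProgX.Base.L.realloc.size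
  /-- the bytes of `reallocarray` -/
  reallocarray : HasCodeNat Lay u₀ ProgX.Base.L.reallocarray.entry ProgX.Base.Code.code_reallocarray.nat ProgX.Base.L.reallocarray.size
  /-- the bytes of `sift_down` -/
  sift_down : HasCodeNat Lay u₀ ProgX.Base.L.sift_down.entry ProgX.Base.Code.code_sift_down.nat ProgX.Base.L.sift_down.size
  /-- the bytes of `sin` -/
  sin : HasCodeNat Lay u₀ ProgX.Base.L.sin.entry ProgX.Base.Code.code_sin.nat ProgX.Base.L.sin.size
  /-- the bytes of `exp` -/
  exp : HasCodeNat Lay u₀ ProgX.Base.L.exp.entry ProgX.Base.Code.code_exp.nat ProgX.Base.L.exp.size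
  /-- the bytes of `pow` -/
  pow : HasCodeNat Lay u₀ ProgX.Base.L.pow.entry ProgX.Base.Code.code_pow.nat ProgX.Base.L.pow.size
  /-- the bytes of `qsort` -/
  qsort : HasCodeNat Lay u₀ ProgX.Base.L.qsort.entry ProgX.Base.Code.code_qsort.nat ProgX.Base.L.qsort.size

/-- **The contract of every unit, with no hypothesis about a callee left.** -/
structure Contracts (Lay : Layout) (μ : Microarch) (u₀ : State) : Prop where
  /-- unit `abs` -/
  abs : ∀ (others : List Obj) (frames : List (Nat × FrameLayout)), Calls Lay μ ProgX.Base.WayInv (ProgX.Base.conv u₀) ProgX.Base.L.abs.entry (ProgX.Base.Spec.abs.spec others frames)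
  /-- unit `arena_poison` -/
  arena_poison : Calls Lay μ ProgX.Base.WayInv (ProgX.Base.conv u₀) ProgX.Base.L.arena_poison.entry Asan.arenaPoisonSpec
  /-- unit `arena_unpoison` -/
  arena_unpoison : Calls Lay μ ProgX.Base.WayInv (ProgX.Base.conv u₀) ProgX.Base.L.arena_unpoison.entry Asan.arenaUnpoisonSpec
  /-- unit `asan_load1_noabort` -/
  asan_load1_noabort : Asan.SmallCheck Lay μ ProgX.Base.WayInv (ProgX.Base.CodeOK u₀) [.rax, .rdx] 1 ProgX.Base.L.__asan_load1_noabort.entry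
  /-- unit `asan_load2_noabort` -/
  asan_load2_noabort : Asan.SmallCheck Lay μ ProgX.Base.WayInv (ProgX.Base.CodeOK u₀) [.rax, .rcx, .rdx] 2 ProgX.Base.L.__asan_load2_noabort.entry
  /-- unit `asan_load4_noabort` -/
  asan_load4_noabort : Asan.SmallCheck Lay μ ProgX.Base.WayInv (ProgX.Base.CodeOK u₀) [.rax, .rcx, .rdx] 4 ProgX.Base.L.__asan_load4_noabort.entry
  /-- unit `asan_load8_noabort` -/
  asan_load8_noabort : Asan.SmallCheck Lay μ ProgX.Base.WayInv (ProgX.Base.CodeOK u₀) [.rax, .rcx, .rdx] 8 ProgX.Base.L.__asan_load8_noabort.entry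
  /-- unit `asan_store1_noabort` -/
  asan_store1_noabort : Asan.SmallCheck Lay μ ProgX.Base.WayInv (ProgX.Base.CodeOK u₀) [.rax, .rdx] 1 ProgX.Base.L.__asan_store1_noabort.entry
  /-- unit `asan_store2_noabort` -/
  asan_store2_noabort : Asan.SmallCheck Lay μ ProgX.Base.WayInv (ProgX.Base.CodeOK u₀) [.rax, .rcx, .rdx] 2 ProgX.Base.L.__asan_store2_noabort.entry
  /-- unit `asan_store4_noabort` -/
  asan_store4_noabort : Asan.SmallCheck Lay μ ProgX.Base.WayInv (ProgX.Base.CodeOK u₀) [.rax, .rcx, .rdx] 4 ProgX.Base.L.__asan_store4_noabort.entry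
  /-- unit `asan_store8_noabort` -/
  asan_store8_noabort : Asan.SmallCheck Lay μ ProgX.Base.WayInv (ProgX.Base.CodeOK u₀) [.rax, .rcx, .rdx] 8 ProgX.Base.L.__asan_store8_noabort.entry
  /-- unit `cos_poly` -/
  cos_poly : ∀ (others : List Obj) (frames : List (Nat × FrameLayout)), Calls Lay μ ProgX.Base.WayInv (ProgX.Base.conv u₀) ProgX.Base.L.cos_poly.entry (ProgX.Base.Spec.cos_poly.spec others frames)
  /-- unit `floor` -/
  floor : ∀ (others : List Obj) (frames : List (Nat × FrameLayout)), Calls Lay μ ProgX.Base.WayInv (ProgX.Base.conv u₀) ProgX.Base.L.floor.entry (ProgX.Base.Spec.floor.spec others frames)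
  /-- unit `heap_alloc` -/
  heap_alloc : ∀ (H : Heap) (rest : List Obj) (frames : List (Nat × FrameLayout)), Calls Lay μ ProgX.Base.WayInv (ProgX.Base.conv u₀) ProgX.Base.L.heap_alloc.entry (ProgX.Base.Spec.heap_alloc.spec H rest frames)
  /-- unit `heap_live_size` -/
  heap_live_size : ∀ (H : Heap) (n : Nat), Calls Lay μ ProgX.Base.WayInv (ProgX.Base.conv u₀) ProgX.Base.L.heap_live_size.entry (ProgX.Base.Spec.heap_live_size.spec H n)
  /-- unit `heap_product_ok` -/
  heap_product_ok : Calls Lay μ ProgX.Base.WayInv (ProgX.Base.conv u₀) ProgX.Base.L.heap_product_ok.entry ProgX.Base.Spec.heap_product_ok.spec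
  /-- unit `malloc` -/
  malloc : ∀ (H : Heap) (rest : List Obj) (frames : List (Nat × FrameLayout)), Calls Lay μ ProgX.Base.WayInv (ProgX.Base.conv u₀) ProgX.Base.L.malloc.entry (ProgX.Base.Spec.malloc.spec H rest frames)
  /-- unit `memcmp` -/
  memcmp : ∀ (others : List Obj) (frames : List (Nat × FrameLayout)), Calls Lay μ ProgX.Base.WayInv (ProgX.Base.conv u₀) ProgX.Base.L.memcmp.entry (ProgX.Base.Spec.memcmp.spec others frames)
  /-- unit `memcpy` -/
  memcpy : ∀ (others : List Obj) (frames : List (Nat × FrameLayout)), Calls Lay μ ProgX.Base.WayInv (ProgX.Base.conv u₀) ProgX.Base.L.memcpy.entry (ProgX.Base.Spec.memcpy.spec others frames)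
  /-- unit `memset` -/
  memset : ∀ (others : List Obj) (frames : List (Nat × FrameLayout)), Calls Lay μ ProgX.Base.WayInv (ProgX.Base.conv u₀) ProgX.Base.L.memset.entry (ProgX.Base.Spec.memset.spec others frames)
  /-- unit `pow_int` -/
  pow_int : ∀ (others : List Obj) (frames : List (Nat × FrameLayout)), Calls Lay μ ProgX.Base.WayInv (ProgX.Base.conv u₀) ProgX.Base.L.pow_int.entry (ProgX.Base.Spec.pow_int.spec others frames)
  /-- unit `range_bad` -/
  range_bad : Calls Lay μ ProgX.Base.WayInv (ProgX.Base.conv u₀) ProgX.Base.L.range_bad.entry Asan.rangeBadSpec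
  /-- unit `sin_poly` -/
  sin_poly : ∀ (others : List Obj) (frames : List (Nat × FrameLayout)), Calls Lay μ ProgX.Base.WayInv (ProgX.Base.conv u₀) ProgX.Base.L.sin_poly.entry (ProgX.Base.Spec.sin_poly.spec others frames)
  /-- unit `sincos_quadrant` -/
  sincos_quadrant : ∀ (others : List Obj) (frames : List (Nat × FrameLayout)), Calls Lay μ ProgX.Base.WayInv (ProgX.Base.conv u₀) ProgX.Base.L.sincos_quadrant.entry (ProgX.Base.Spec.sincos_quadrant.spec others frames)
  /-- unit `swap_bytes` -/
  swap_bytes : ∀ (others : List Obj) (frames : List (Nat × FrameLayout)), Calls Lay μ ProgX.Base.WayInv (ProgX.Base.conv u₀) ProgX.Base.L.swap_bytes.entry (ProgX.Base.Spec.swap_bytes.spec others frames)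
  /-- unit `two_to` -/
  two_to : ∀ (others : List Obj) (frames : List (Nat × FrameLayout)), Calls Lay μ ProgX.Base.WayInv (ProgX.Base.conv u₀) ProgX.Base.L.two_to.entry (ProgX.Base.Spec.two_to.spec others frames)
  /-- unit `asan_load16_noabort` -/
  asan_load16_noabort : Calls Lay μ ProgX.Base.WayInv (ProgX.Base.conv u₀) ProgX.Base.L.__asan_load16_noabort.entry Asan.check16Spec
  /-- unit `asan_loadN_noabort` -/
  asan_loadN_noabort : Calls Lay μ ProgX.Base.WayInv (ProgX.Base.conv u₀) ProgX.Base.L.__asan_loadN_noabort.entry Asan.checkNSpec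
  /-- unit `asan_store16_noabort` -/
  asan_store16_noabort : Calls Lay μ ProgX.Base.WayInv (ProgX.Base.conv u₀) ProgX.Base.L.__asan_store16_noabort.entry Asan.check16Spec
  /-- unit `asan_storeN_noabort` -/
  asan_storeN_noabort : Calls Lay μ ProgX.Base.WayInv (ProgX.Base.conv u₀) ProgX.Base.L.__asan_storeN_noabort.entry Asan.checkNSpec
  /-- unit `calloc` -/
  calloc : ∀ (H : Heap) (rest : List Obj) (frames : List (Nat × FrameLayout)), Calls Lay μ ProgX.Base.WayInv (ProgX.Base.conv u₀) ProgX.Base.L.calloc.entry (ProgX.Base.Spec.calloc.spec H rest frames)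
  /-- unit `cos` -/
  cos : ∀ (others : List Obj) (frames : List (Nat × FrameLayout)), Calls Lay μ ProgX.Base.WayInv (ProgX.Base.conv u₀) ProgX.Base.L.cos.entry (ProgX.Base.Spec.cos.spec others frames)
  /-- unit `free` -/
  free : ∀ (H : Heap) (rest : List Obj) (frames : List (Nat × FrameLayout)) (n : Nat), Calls Lay μ ProgX.Base.WayInv (ProgX.Base.conv u₀) ProgX.Base.L.free.entry (ProgX.Base.Spec.free.spec H rest frames n)
  /-- unit `ldexp` -/
  ldexp : ∀ (others : List Obj) (frames : List (Nat × FrameLayout)), Calls Lay μ ProgX.Base.WayInv (ProgX.Base.conv u₀) ProgX.Base.L.ldexp.entry (ProgX.Base.Spec.ldexp.spec others frames)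
  /-- unit `log` -/
  log : ∀ (others : List Obj) (frames : List (Nat × FrameLayout)), Calls Lay μ ProgX.Base.WayInv (ProgX.Base.conv u₀) ProgX.Base.L.log.entry (ProgX.Base.Spec.log.spec others frames)
  /-- unit `realloc` -/
  realloc : ∀ (H : Heap) (rest : List Obj) (frames : List (Nat × FrameLayout)) (n c : Nat), Calls Lay μ ProgX.Base.WayInv (ProgX.Base.conv u₀) ProgX.Base.L.realloc.entry (ProgX.Base.Spec.realloc.spec H rest frames n c)
  /-- unit `reallocarray` -/
  reallocarray : ∀ (H : Heap) (rest : List Obj) (frames : List (Nat × FrameLayout)) (n c : Nat), Calls Lay μ ProgX.Base.WayInv (ProgX.Base.conv u₀) ProgX.Base.L.reallocarray.entry (ProgX.Base.Spec.reallocarray.spec H rest frames n c)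
  /-- unit `sift_down` -/
  sift_down : ∀ (others : List Obj) (frames : List (Nat × FrameLayout)) (cmp : Word) (w : Nat), ProgX.Base.Spec.CmpSpec Lay μ u₀ others frames cmp w → Calls Lay μ ProgX.Base.WayInv (ProgX.Base.conv u₀) ProgX.Base.L.sift_down.entry (ProgX.Base.Spec.sift_down.spec others frames cmp w)
  /-- unit `sin` -/
  sin : ∀ (others : List Obj) (frames : List (Nat × FrameLayout)), Calls Lay μ ProgX.Base.WayInv (ProgX.Base.conv u₀) ProgX.Base.L.sin.entry (ProgX.Base.Spec.sin.spec others frames)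
  /-- unit `exp` -/
  exp : ∀ (others : List Obj) (frames : List (Nat × FrameLayout)), Calls Lay μ ProgX.Base.WayInv (ProgX.Base.conv u₀) ProgX.Base.L.exp.entry (ProgX.Base.Spec.exp.spec others frames)
  /-- unit `pow` -/
  pow : ∀ (others : List Obj) (frames : List (Nat × FrameLayout)), Calls Lay μ ProgX.Base.WayInv (ProgX.Base.conv u₀) ProgX.Base.L.pow.entry (ProgX.Base.Spec.pow.spec others frames)
  /-- unit `qsort` -/
  qsort : ∀ (others : List Obj) (frames : List (Nat × FrameLayout)) (cmp : Word) (w : Nat), ProgX.Base.Spec.CmpSpec Lay μ u₀ others frames cmp w → Calls Lay μ ProgX.Base.WayInv (ProgX.Base.conv u₀) ProgX.Base.L.qsort.entry (ProgX.Base.Spec.qsort.spec others frames cmp w)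

/-- **THE COMPOSITION**: one line per unit, callees before callers. -/
theorem closed (Lay : Layout) (hLay : Lay.hi = 0x1000000) (μ : Microarch) (hμ : UserX.MicroOK μ) (u₀ : State)
    (hcode : AllCode Lay u₀) : Contracts Lay μ u₀ := by
  have h_abs := ProgX.Base.Spec.Proved.abs_ok Lay hLay μ hμ u₀ hcode.abs
  have h_arena_poison := ProgX.Base.Spec.Proved.arena_poison_ok Lay hLay μ hμ u₀ hcode.arena_poison
  have h_arena_unpoison := ProgX.Base.Spec.Proved.arena_unpoison_ok Lay hLay μ hμ u₀ hcode.arena_unpoison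
  have h_asan_load1_noabort := ProgX.Base.Spec.Proved.asan_load1_noabort_ok Lay hLay μ hμ u₀ hcode.asan_load1_noabort
  have h_asan_load2_noabort := ProgX.Base.Spec.Proved.asan_load2_noabort_ok Lay hLay μ hμ u₀ hcode.asan_load2_noabort
  have h_asan_load4_noabort := ProgX.Base.Spec.Proved.asan_load4_noabort_ok Lay hLay μ hμ u₀ hcode.asan_load4_noabort
  have h_asan_load8_noabort := ProgX.Base.Spec.Proved.asan_load8_noabort_ok Lay hLay μ hμ u₀ hcode.asan_load8_noabort
  have h_asan_store1_noabort := ProgX.Base.Spec.Proved.asan_store1_noabort_ok Lay hLay μ hμ u₀ hcode.asan_store1_noabort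
  have h_asan_store2_noabort := ProgX.Base.Spec.Proved.asan_store2_noabort_ok Lay hLay μ hμ u₀ hcode.asan_store2_noabort
  have h_asan_store4_noabort := ProgX.Base.Spec.Proved.asan_store4_noabort_ok Lay hLay μ hμ u₀ hcode.asan_store4_noabort
  have h_asan_store8_noabort := ProgX.Base.Spec.Proved.asan_store8_noabort_ok Lay hLay μ hμ u₀ hcode.asan_store8_noabort
  have h_cos_poly := ProgX.Base.Spec.Proved.cos_poly_ok Lay hLay μ hμ u₀ hcode.cos_poly
  have h_floor := ProgX.Base.Spec.Proved.floor_ok Lay hLay μ hμ u₀ hcode.floor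
  have h_heap_alloc := ProgX.Base.Spec.Proved.heap_alloc_ok Lay hLay μ hμ u₀ hcode.heap_alloc h_arena_unpoison
  have h_heap_live_size := ProgX.Base.Spec.Proved.heap_live_size_ok Lay hLay μ hμ u₀ hcode.heap_live_size
  have h_heap_product_ok := ProgX.Base.Spec.Proved.heap_product_ok_ok Lay hLay μ hμ u₀ hcode.heap_product_ok
  have h_malloc := ProgX.Base.Spec.Proved.malloc_ok Lay hLay μ hμ u₀ hcode.malloc h_heap_alloc
  have h_memcmp := ProgX.Base.Spec.Proved.memcmp_ok Lay hLay μ hμ u₀ hcode.memcmp h_asan_load1_noabort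
  have h_memcpy := ProgX.Base.Spec.Proved.memcpy_ok Lay hLay μ hμ u₀ hcode.memcpy h_asan_load1_noabort h_asan_store1_noabort
  have h_memset := ProgX.Base.Spec.Proved.memset_ok Lay hLay μ hμ u₀ hcode.memset h_asan_store1_noabort
  have h_pow_int := ProgX.Base.Spec.Proved.pow_int_ok Lay hLay μ hμ u₀ hcode.pow_int
  have h_range_bad := ProgX.Base.Spec.Proved.range_bad_ok Lay hLay μ hμ u₀ hcode.range_bad
  have h_sin_poly := ProgX.Base.Spec.Proved.sin_poly_ok Lay hLay μ hμ u₀ hcode.sin_poly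
  have h_sincos_quadrant := ProgX.Base.Spec.Proved.sincos_quadrant_ok Lay hLay μ hμ u₀ hcode.sincos_quadrant h_floor h_cos_poly h_sin_poly
  have h_swap_bytes := ProgX.Base.Spec.Proved.swap_bytes_ok Lay hLay μ hμ u₀ hcode.swap_bytes h_asan_load1_noabort
  have h_two_to := ProgX.Base.Spec.Proved.two_to_ok Lay hLay μ hμ u₀ hcode.two_to
  have h_asan_load16_noabort := ProgX.Base.Spec.Proved.asan_load16_noabort_ok Lay hLay μ hμ u₀ hcode.asan_load16_noabort h_range_bad
  have h_asan_loadN_noabort := ProgX.Base.Spec.Proved.asan_loadN_noabort_ok Lay hLay μ hμ u₀ hcode.asan_loadN_noabort h_range_bad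
  have h_asan_store16_noabort := ProgX.Base.Spec.Proved.asan_store16_noabort_ok Lay hLay μ hμ u₀ hcode.asan_store16_noabort h_range_bad
  have h_asan_storeN_noabort := ProgX.Base.Spec.Proved.asan_storeN_noabort_ok Lay hLay μ hμ u₀ hcode.asan_storeN_noabort h_range_bad
  have h_calloc := ProgX.Base.Spec.Proved.calloc_ok Lay hLay μ hμ u₀ hcode.calloc h_heap_product_ok h_malloc h_memset
  have h_cos := ProgX.Base.Spec.Proved.cos_ok Lay hLay μ hμ u₀ hcode.cos h_sincos_quadrant
  have h_free := ProgX.Base.Spec.Proved.free_ok Lay hLay μ hμ u₀ hcode.free h_heap_live_size h_arena_poison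
  have h_ldexp := ProgX.Base.Spec.Proved.ldexp_ok Lay hLay μ hμ u₀ hcode.ldexp h_two_to
  have h_log := ProgX.Base.Spec.Proved.log_ok Lay hLay μ hμ u₀ hcode.log h_two_to
  have h_realloc := ProgX.Base.Spec.Proved.realloc_ok Lay hLay μ hμ u₀ hcode.realloc h_heap_live_size h_heap_alloc h_malloc h_memcpy h_free h_arena_poison h_arena_unpoison
  have h_reallocarray := ProgX.Base.Spec.Proved.reallocarray_ok Lay hLay μ hμ u₀ hcode.reallocarray h_heap_product_ok h_realloc
  have h_sift_down := ProgX.Base.Spec.Proved.sift_down_ok Lay hLay μ hμ u₀ hcode.sift_down h_swap_bytes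
  have h_sin := ProgX.Base.Spec.Proved.sin_ok Lay hLay μ hμ u₀ hcode.sin h_sincos_quadrant
  have h_exp := ProgX.Base.Spec.Proved.exp_ok Lay hLay μ hμ u₀ hcode.exp h_two_to h_floor h_ldexp
  have h_pow := ProgX.Base.Spec.Proved.pow_ok Lay hLay μ hμ u₀ hcode.pow h_pow_int h_log h_exp
  have h_qsort := ProgX.Base.Spec.Proved.qsort_ok Lay hLay μ hμ u₀ hcode.qsort h_sift_down h_swap_bytes
  exact {
    abs := h_abs,
    arena_poison := h_arena_poison,
    arena_unpoison := h_arena_unpoison,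
    asan_load1_noabort := h_asan_load1_noabort,
    asan_load2_noabort := h_asan_load2_noabort,
    asan_load4_noabort := h_asan_load4_noabort,
    asan_load8_noabort := h_asan_load8_noabort,
    asan_store1_noabort := h_asan_store1_noabort,
    asan_store2_noabort := h_asan_store2_noabort,
    asan_store4_noabort := h_asan_store4_noabort,
    asan_store8_noabort := h_asan_store8_noabort,
    cos_poly := h_cos_poly,
    floor := h_floor,
    heap_alloc := h_heap_alloc,
    heap_live_size := h_heap_live_size,
    heap_product_ok := h_heap_product_ok,
    malloc := h_malloc,
    memcmp := h_memcmp,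
    memcpy := h_memcpy,
    memset := h_memset,
    pow_int := h_pow_int,
    range_bad := h_range_bad,
    sin_poly := h_sin_poly,
    sincos_quadrant := h_sincos_quadrant,
    swap_bytes := h_swap_bytes,
    two_to := h_two_to,
    asan_load16_noabort := h_asan_load16_noabort,
    asan_loadN_noabort := h_asan_loadN_noabort,
    asan_store16_noabort := h_asan_store16_noabort,
    asan_storeN_noabort := h_asan_storeN_noabort,
    calloc := h_calloc,
    cos := h_cos,
    free := h_free,
    ldexp := h_ldexp,
    log := h_log,
    realloc := h_realloc,
    reallocarray := h_reallocarray,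
    sift_down := h_sift_down,
    sin := h_sin,
    exp := h_exp,
    pow := h_pow,
    qsort := h_qsort
  }

end ProgX.Base.Closed
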